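-- pv_equiv track=rewrite | github.com/BenF78/Event-Manager---Python | Event Manager/tools.py | is_all_symbols
-- ===== SOURCE A (Python) =====
-- def is_all_symbols(string) -> bool:
--     symbols = ['!', '@', '#', '$', '%', '^', '&', '*', '(', ')', '_', '+', '-', '=', '{', '}', '[', ']', ':', ';', '<', '>', '/', '\\', '|', ',', '.', '?', '~', '`']
--
--     for char in string:
--         if char not in symbols:
--             return False
--
--     if string != "":
--         return True
--     else:
--         return False
-- ===== SOURCE B (Python) =====
-- SYMBOLS_STR = '!@#$%^&*()_+-={}[]:;<>/\\|,.?~`'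
--
-- def is_all_symbols(string) -> bool:
--     # A string consists only of symbol characters iff stripping symbol
--     # characters from both ends leaves nothing (and the string was non-empty).
--     return string != "" and string.strip(SYMBOLS_STR) == ""
-- ===== Notes on version B (the rewrite author's own statement) =====
-- stated objective: idiomatic
-- what changed: Replaces A's character-by-character early-exit membership loop with str.strip over the symbol alphabet: the string is all symbols iff stripping symbol characters from both ends leaves the empty string (with an explicit non-empty guard).
import Mathlib
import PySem

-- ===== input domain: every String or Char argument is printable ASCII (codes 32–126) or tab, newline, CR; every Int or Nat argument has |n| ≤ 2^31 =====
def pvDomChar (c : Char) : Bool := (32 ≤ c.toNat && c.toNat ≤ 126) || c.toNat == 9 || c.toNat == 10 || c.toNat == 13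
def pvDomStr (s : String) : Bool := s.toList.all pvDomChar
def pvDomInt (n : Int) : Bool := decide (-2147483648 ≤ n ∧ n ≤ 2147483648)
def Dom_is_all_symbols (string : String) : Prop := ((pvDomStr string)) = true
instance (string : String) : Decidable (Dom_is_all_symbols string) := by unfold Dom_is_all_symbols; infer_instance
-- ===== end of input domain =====

-- B replaces A's per-character early-exit membership loop by a two-ended str.strip over the
-- symbol alphabet plus an emptiness test (idiomatic; same return value).

-- ===== PORT A =====
def symbolsA : List Char := ['!', '@', '#', '$', '%', '^', '&', '*', '(', ')', '_', '+', '-', '=', '{', '}', '[', ']', ':', ';', '<', '>', '/', '\\', '|', ',', '.', '?', '~', '`']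

-- the 'for char in string' loop with its early 'return False'
def isAllLoop : List Char → Bool
  | [] => true
  | c :: cs => if symbolsA.contains c then isAllLoop cs else false

def is_all_symbols (string : String) : Bool :=
  if isAllLoop string.toList then
    if string ≠ "" then true else false
  else false

-- ===== PORT B =====
def SYMBOLS_STR : String := "!@#$%^&*()_+-={}[]:;<>/\\|,.?~`"

def is_all_symbols_alt (string : String) : Bool :=
  decide (string ≠ "") && decide (PySem.Str.stripChars string SYMBOLS_STR = "")

-- ===== PRECONDITION & SPEC =====
def Spec_is_all_symbols (string : String) (out : Bool) : Prop := out = is_all_symbols_alt string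
instance (string : String) (out : Bool) : Decidable (Spec_is_all_symbols string out) := by unfold Spec_is_all_symbols; infer_instance

-- ===== CLAIM (what is proved, stated in full; the proofs are below) =====
def Claim_equal_is_all_symbols : Prop := ∀ (string : String), Dom_is_all_symbols string → Spec_is_all_symbols string (is_all_symbols string)

-- ===== LEMMAS AND PROOFS =====
theorem isAllLoop_iff (cs : List Char) : isAllLoop cs = true ↔ ∀ c ∈ cs, c ∈ symbolsA := by
  induction cs with
  | nil => simp [isAllLoop]
  | cons c cs ih =>
    simp only [isAllLoop]
    by_cases h : symbolsA.contains c <;> simp [ih, List.contains_eq_mem] at *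

theorem stripChars_eq_nil_iff (l : List Char) :
    PySem.Chars.stripChars l SYMBOLS_STR.toList = [] ↔ ∀ c ∈ l, c ∈ symbolsA := by
  have hsym : SYMBOLS_STR.toList = symbolsA := by decide
  unfold PySem.Chars.stripChars
  rw [hsym]
  constructor
  · intro h c hc
    have h1 : ∀ c ∈ (List.dropWhile (fun c => symbolsA.contains c) l).reverse,
        symbolsA.contains c = true := by
      rw [← List.dropWhile_eq_nil_iff]
      simpa using h
    rcases (List.takeWhile_append_dropWhile (p := fun c => symbolsA.contains c) (l := l)) ▸ hc
      |> List.mem_append.1 with h2 | h2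
    · simpa using List.mem_takeWhile_imp h2
    · simpa using h1 c (List.mem_reverse.2 h2)
  · intro h
    have hdrop : List.dropWhile (fun c => symbolsA.contains c) l = [] := by
      rw [List.dropWhile_eq_nil_iff]
      intro c hc; simpa using h c hc
    show (List.dropWhile (fun c => symbolsA.contains c)
      (List.dropWhile (fun c => symbolsA.contains c) l).reverse).reverse = []
    rw [hdrop]
    simp

theorem strip_empty_iff (s : String) :
    (PySem.Str.stripChars s SYMBOLS_STR = "") ↔ ∀ c ∈ s.toList, c ∈ symbolsA := by
  rw [← stripChars_eq_nil_iff, ← PySem.Str.toList_stripChars]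
  exact Iff.symm String.toList_eq_nil_iff

-- ===== VERDICT (by name: the statement is the Claim_ definition above) =====
theorem is_all_symbols_spec : Claim_equal_is_all_symbols := by
  intro s _
  unfold Spec_is_all_symbols is_all_symbols is_all_symbols_alt
  by_cases hl : isAllLoop s.toList = true
  · have hstrip : PySem.Str.stripChars s SYMBOLS_STR = "" :=
      (strip_empty_iff s).2 ((isAllLoop_iff s.toList).1 hl)
    simp [hl, hstrip]
  · have hstrip : ¬ (PySem.Str.stripChars s SYMBOLS_STR = "") := by
      intro h
      exact hl ((isAllLoop_iff s.toList).2 ((strip_empty_iff s).1 h))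
    simp [Bool.eq_false_iff.2 hl, hstrip]
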